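-- pv_equiv track=rewrite | github.com/SmilingSammy/TIL | Algorithm/coding-test/programmers/Lv2/archery.py | solution
-- ===== SOURCE A (Python) =====
-- from copy import copy
--
-- def solution(n, info):
--     answer = [None, 0]
--     queue = [[[0] * 11, 0, n]]
--
--     while queue:
--         score, order, arrows = queue.pop(0)
--
--         # 1~10점 case 전부 탐색 or 화살이 없는 경우 --> 점수 계산
--         if order == 11 or arrows == 0:
--             if arrows:
--                 score[-1] += arrows
--
--             gap = 0
--
--             for i, s in enumerate(score):
--                 if info[i] == 0 and score[i] == 0:
--                     continue
--
--                 gap = gap - (10 - i) if info[i] >= score[i] else gap + (10 - i)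
--
--             if answer[-1] < gap:
--                 answer = [score, gap]
--             elif answer[-1] == gap and answer[0]:
--                 for i in range(10, -1, -1):
--                     if answer[0][i] == score[i]:
--                         continue
--                     if answer[0][i] > score[i]:
--                         break
--                     else:
--                         answer = [score, gap]
--                         break
--
--             continue
--
--         # 해당 점수를 포기하는 경우 (비기거나, 적게 맞추거나 --> 그냥 0개 맞추는 것이 젤 best)
--         queue.append([score, order + 1, arrows])
--
--         # 해당 점수를 얻는 경우 (어피치 맞춘 횟수 + 1)
--         if arrows >= info[order] + 1:
--             tmp = copy(score)
--             tmp[order] = info[order] + 1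
--             queue.append([tmp, order + 1, arrows - (info[order] + 1)])
--
--     return answer[0] if answer[-1] != 0 else [-1]
-- ===== SOURCE B (Python) =====
-- # Recursive DFS over the 11 rings (win-or-skip), keeping a single running best,
-- # instead of A's BFS over an explicit queue of full score vectors.
-- def solution(n, info):
--     def gap_of(score):
--         g = 0
--         for i in range(11):
--             if info[i] == 0 and score[i] == 0:
--                 continue
--             g = g + (10 - i) if score[i] > info[i] else g - (10 - i)
--         return g
--
--     def beats(s, t):  # at equal gap, does s win the tie-break against t?
--         for i in range(10, -1, -1):
--             if s[i] != t[i]: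
--                 return s[i] > t[i]
--         return False
--
--     best = None  # (gap, score) or None
--
--     def dfs(i, arrows, score):
--         nonlocal best
--         if i >= 11 or arrows == 0:
--             s = score + [0] * (11 - i)
--             s[10] += arrows
--             g = gap_of(s)
--             if g > 0 and (best is None or g > best[0]
--                           or (g == best[0] and beats(s, best[1]))):
--                 best = (g, s)
--             return
--         dfs(i + 1, arrows, score + [0])
--         need = info[i] + 1
--         if arrows >= need:
--             dfs(i + 1, arrows - need, score + [need])
--
--     dfs(0, n, [])
--     return best[1] if best else [-1]
-- ===== Notes on version B (the rewrite author's own statement) =====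
-- stated objective: alternative
-- what changed: Replaces the BFS over an explicit queue of full 11-slot score vectors with a recursive win-or-skip DFS that builds the score prefix incrementally and keeps a single running (gap, score) best; the choice of best is order-independent, so the result is identical.
import Mathlib
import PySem

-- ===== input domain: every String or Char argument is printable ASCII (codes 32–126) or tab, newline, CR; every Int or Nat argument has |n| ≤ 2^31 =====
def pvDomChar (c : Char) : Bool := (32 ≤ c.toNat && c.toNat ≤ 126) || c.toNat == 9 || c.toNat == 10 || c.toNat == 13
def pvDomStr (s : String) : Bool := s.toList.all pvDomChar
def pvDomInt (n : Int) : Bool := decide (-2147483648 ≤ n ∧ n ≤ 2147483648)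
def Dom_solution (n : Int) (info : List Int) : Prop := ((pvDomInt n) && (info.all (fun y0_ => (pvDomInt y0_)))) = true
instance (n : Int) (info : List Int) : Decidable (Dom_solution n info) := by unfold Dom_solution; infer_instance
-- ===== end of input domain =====

-- B replaces A's BFS over an explicit queue of full 11-slot score vectors by a recursive
-- win-or-skip DFS keeping one running best; same return value (A does not mutate its arguments).

-- ===== PORT A =====
-- gap computation: 'for i, s in enumerate(score): ...'
-- (indices i are 0..10 and Pre_ gives len(info) ≥ 11, score always has 11 entries, so getD is exact)
def gapA (info score : List Int) : Int :=
  (PySem.List.enumerate score).foldl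
    (fun g p =>
      if info.getD p.1.toNat 0 == 0 && score.getD p.1.toNat 0 == 0 then g
      else if info.getD p.1.toNat 0 ≥ score.getD p.1.toNat 0 then g - (10 - p.1) else g + (10 - p.1))
    0

-- the tie-break loop 'for i in range(10, -1, -1): ...' (the index list is [10, 9, …, 0];
-- answer[0] and score always have 11 entries when this runs, so getD is exact)
def tieAux (idxs : List Nat) (ans : List Int × Int) (score : List Int) (gap : Int) : List Int × Int :=
  match idxs with
  | [] => ans
  | i :: r =>
      if ans.1.getD i 0 == score.getD i 0 then tieAux r ans score gap
      else if ans.1.getD i 0 > score.getD i 0 then ans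
      else (score, gap)

-- the leaf branch of A's while loop (answer[0] = None is modelled as []; both are falsy in
-- 'answer[0]' and None is returned only when gap ≠ 0 never happened, where A returns [-1])
def leafUpdate (info : List Int) (ans : List Int × Int) (score : List Int) (arrows : Int) :
    List Int × Int :=
  let score' := if arrows != 0 then
      score.set (score.length - 1) (score.getD (score.length - 1) 0 + arrows)
    else score
  let gap := gapA info score'
  if ans.2 < gap then (score', gap)
  else if ans.2 == gap && !ans.1.isEmpty then tieAux ((List.range 11).reverse) ans score' gap
  else ans

-- A's while loop over the queue; entries are (score, order, arrows); order starts at 0 and only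
-- ever grows by 1, so it is a Nat; the hypothesis 'order ≤ 11' (true of every state A ever
-- enqueues) is carried only to justify termination. info[order] is in range under Pre_ (order ≤ 10).
def loopA (info : List Int) (q : List (List Int × Nat × Int)) (ans : List Int × Int)
    (h : ∀ e ∈ q, e.2.1 ≤ 11) : List Int × Int :=
  match q with
  | [] => ans
  | (score, order, arrows) :: rest =>
    if hleaf : order == 11 || arrows == 0 then
      loopA info rest (leafUpdate info ans score arrows)
        (fun e he => h e (List.mem_cons_of_mem _ he))
    else
      loopA info
        (rest ++ ((score, order + 1, arrows) ::
          (if arrows ≥ info.getD order 0 + 1 then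
            [(score.set order (info.getD order 0 + 1), order + 1,
              arrows - (info.getD order 0 + 1))]
          else [])))
        ans
        (by
          intro e he
          rcases List.mem_append.1 he with h1 | h1
          · exact h e (List.mem_cons_of_mem _ h1)
          · have ho : order ≤ 11 := h (score, order, arrows) List.mem_cons_self
            have hne : order ≠ 11 := by
              intro hc; apply hleaf; simp [hc]
            have : e.2.1 = order + 1 := by
              rcases List.mem_cons.1 h1 with rfl | h1
              · rfl
              · split at h1 <;> simp at h1 <;> simp [h1]
            omega)
termination_by (q.map (fun e => 3 ^ (11 - e.2.1))).sum
decreasing_by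
  · have hp : 0 < 3 ^ (11 - order) := pow_pos (by norm_num) _
    simp only [List.map_cons, List.sum_cons]
    omega
  · have ho : order ≤ 11 := h (score, order, arrows) List.mem_cons_self
    have hne : order ≠ 11 := by intro hc; apply hleaf; simp [hc]
    have hpos : 0 < 3 ^ (10 - order) := pow_pos (by norm_num) _
    have hpow : 11 - order = (10 - order) + 1 := by omega
    have hlt : 2 * 3 ^ (10 - order) < 3 ^ (11 - order) := by
      rw [hpow, pow_succ]; omega
    have h11 : 11 - (order + 1) = 10 - order := by omega
    simp only [List.map_append, List.sum_append, List.map_cons, List.sum_cons]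
    split
    · simp only [List.map_cons, List.map_nil, List.sum_cons, List.sum_nil, h11]
      omega
    · simp only [List.map_nil, List.sum_nil, h11]
      omega

-- the initial queue [[0]*11, 0, n] trivially satisfies the order bound the loop carries
theorem initInv (n : Int) :
    ∀ e ∈ ([(List.replicate 11 (0 : Int), (0 : Nat), n)] : List (List Int × Nat × Int)),
      e.2.1 ≤ 11 := by
  intro e he
  simp only [List.mem_singleton] at he
  simp [he]

def solution (n : Int) (info : List Int) : List Int :=
  let r := loopA info [(List.replicate 11 0, 0, n)] ([], 0) (initInv n)
  if r.2 != 0 then r.1 else [-1]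

-- ===== PORT B =====
-- 'gap_of' of Source B: a loop over range(11) (len(info) ≥ 11 under Pre_, score has 11 entries: getD exact)
def gapB (info score : List Int) : Int :=
  (List.range 11).foldl
    (fun g i =>
      if info.getD i 0 == 0 && score.getD i 0 == 0 then g
      else if score.getD i 0 > info.getD i 0 then g + (10 - (i : Int)) else g - (10 - (i : Int)))
    0

-- 'beats' of Source B: scan i = 10, 9, …, 0, decide at the first differing slot
def beatsAux (idxs : List Nat) (s t : List Int) : Bool :=
  match idxs with
  | [] => false
  | i :: r =>
      if s.getD i 0 != t.getD i 0 then decide (s.getD i 0 > t.getD i 0)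
      else beatsAux r s t

def beatsB (s t : List Int) : Bool := beatsAux ((List.range 11).reverse) s t

-- 'dfs' of Source B: i counts rings handled so far (score is the prefix of choices, length i);
-- the leaf test 'i >= 11 or arrows == 0' is Source B's own
def dfsB (info : List Int) (i : Nat) (arrows : Int) (score : List Int)
    (best : Option (Int × List Int)) : Option (Int × List Int) :=
  if hleaf : 11 ≤ i || arrows == 0 then
    let s0 := score ++ List.replicate (11 - i) 0
    let s := s0.set 10 (s0.getD 10 0 + arrows)
    let g := gapB info s
    let take := decide (0 < g) &&
      (match best with
       | none => true
       | some (bg, bs) => decide (bg < g) || (g == bg && beatsB s bs))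
    if take then some (g, s) else best
  else
    let best1 := dfsB info (i + 1) arrows (score ++ [0]) best
    let need := info.getD i 0 + 1
    if arrows ≥ need then dfsB info (i + 1) (arrows - need) (score ++ [need]) best1 else best1
termination_by 11 - i
decreasing_by all_goals (simp at hleaf; omega)

def solution_alt (n : Int) (info : List Int) : List Int :=
  match dfsB info 0 n [] none with
  | some (_, s) => s
  | none => [-1]

-- ===== PRECONDITION & SPEC =====
-- Python A indexes info[i] for every i in 0..10 (and info[order] for order ≤ 10), so it raises
-- IndexError whenever len(info) < 11; exactly those inputs are excluded.
def Pre_solution (n : Int) (info : List Int) : Prop := 11 ≤ info.length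
instance (n : Int) (info : List Int) : Decidable (Pre_solution n info) := by
  unfold Pre_solution; infer_instance

def pvWitness_solution : Int × List Int := (5, [2, 1, 1, 1, 0, 0, 0, 0, 0, 0, 0])

def Spec_solution (n : Int) (info : List Int) (out : List Int) : Prop := out = solution_alt n info
instance (n : Int) (info : List Int) (out : List Int) : Decidable (Spec_solution n info out) := by
  unfold Spec_solution; infer_instance

-- ===== CLAIM (what is proved, stated in full; the proofs are below) =====
def Claim_equal_solution : Prop := ∀ (n : Int) (info : List Int), Dom_solution n info →
  Pre_solution n info → Spec_solution n info (solution n info)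

-- ===== LEMMAS AND PROOFS =====

-- the common finalisation of a full 11-slot score vector: pour the leftover arrows into slot 10
def leafFin (score : List Int) (arrows : Int) : List Int :=
  score.set 10 (score.getD 10 0 + arrows)

-- the leaves produced from a state, in DFS (skip-first) order, with their gaps
def leafList (info : List Int) (order : Nat) (arrows : Int) (score : List Int) :
    List (List Int × Int) :=
  if hleaf : 11 ≤ order || arrows == 0 then
    [(leafFin score arrows, gapB info (leafFin score arrows))]
  else
    leafList info (order + 1) arrows score ++
      (if arrows ≥ info.getD order 0 + 1 then
        leafList info (order + 1) (arrows - (info.getD order 0 + 1))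
          (score.set order (info.getD order 0 + 1))
       else [])
termination_by 11 - order
decreasing_by all_goals (simp at hleaf; omega)

-- the best-so-far update both programs perform at a leaf, as one binary operation
def U (z x : List Int × Int) : List Int × Int :=
  if decide (z.2 < x.2) || ((z.2 == x.2) && !z.1.isEmpty && beatsB x.1 z.1) then x else z

def Good (info : List Int) (x : List Int × Int) : Prop :=
  x.1.length = 11 ∧ x.2 = gapB info x.1

-- ---- beats: a strict order ----

theorem beatsAux_asymm (idxs : List Nat) (s t : List Int) (h : beatsAux idxs s t = true) :
    beatsAux idxs t s = false := by
  induction idxs with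
  | nil => simp [beatsAux] at h
  | cons i r ih =>
      simp only [beatsAux, bne_iff_ne, ne_eq, ite_not, decide_eq_true_eq, gt_iff_lt] at h ⊢
      by_cases he : s.getD i 0 = t.getD i 0
      · simp only [he, if_pos rfl] at h
        simp only [he, if_pos rfl]
        exact ih h
      · rw [if_neg he] at h
        rw [if_neg (Ne.symm he)]
        simp at h ⊢
        omega

theorem beatsAux_trans (idxs : List Nat) (s t u : List Int) (h1 : beatsAux idxs s t = true)
    (h2 : beatsAux idxs t u = true) : beatsAux idxs s u = true := by
  induction idxs with
  | nil => simp [beatsAux] at h1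
  | cons i r ih =>
      simp only [beatsAux, bne_iff_ne, ne_eq, ite_not, gt_iff_lt] at h1 h2 ⊢
      by_cases hst : s.getD i 0 = t.getD i 0
      · rw [if_pos hst] at h1
        by_cases htu : t.getD i 0 = u.getD i 0
        · rw [if_pos htu] at h2
          rw [if_pos (hst.trans htu)]
          exact ih h1 h2
        · rw [if_neg htu] at h2
          simp only [decide_eq_true_eq] at h2
          have : ¬ s.getD i 0 = u.getD i 0 := by omega
          rw [if_neg this]
          simp only [decide_eq_true_eq]
          omega
      · rw [if_neg hst] at h1
        simp only [decide_eq_true_eq] at h1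
        by_cases htu : t.getD i 0 = u.getD i 0
        · have : ¬ s.getD i 0 = u.getD i 0 := by omega
          rw [if_neg this]
          simp only [decide_eq_true_eq]
          omega
        · rw [if_neg htu] at h2
          simp only [decide_eq_true_eq] at h2
          have : ¬ s.getD i 0 = u.getD i 0 := by omega
          rw [if_neg this]
          simp only [decide_eq_true_eq]
          omega

theorem beatsAux_eqOn (idxs : List Nat) (s t : List Int) (h1 : beatsAux idxs s t = false)
    (h2 : beatsAux idxs t s = false) : ∀ i ∈ idxs, s.getD i 0 = t.getD i 0 := by
  induction idxs with
  | nil => intro i hi; simp at hi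
  | cons i r ih =>
      simp only [beatsAux, bne_iff_ne, ne_eq, ite_not, gt_iff_lt] at h1 h2
      by_cases he : s.getD i 0 = t.getD i 0
      · rw [if_pos he] at h1
        rw [if_pos he.symm] at h2
        intro j hj
        rcases List.mem_cons.1 hj with rfl | hj
        · exact he
        · exact ih h1 h2 j hj
      · exfalso
        rw [if_neg he] at h1
        rw [if_neg (Ne.symm he)] at h2
        simp only [decide_eq_false_iff_not, not_lt] at h1 h2
        omega


theorem beatsB_total (s t : List Int) (hs : s.length = 11) (ht : t.length = 11) (hne : s ≠ t) :
    beatsB s t = true ∨ beatsB t s = true := by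
  by_contra hc
  push_neg at hc
  obtain ⟨h1, h2⟩ := hc
  simp only [ne_eq, Bool.not_eq_true] at h1 h2
  have heq : ∀ i ∈ (List.range 11).reverse, s.getD i 0 = t.getD i 0 :=
    beatsAux_eqOn _ _ _ h1 h2
  apply hne
  apply List.ext_getElem (by omega)
  intro i hi _
  have hmem : i ∈ (List.range 11).reverse := by
    simp [List.mem_reverse, List.mem_range]; omega
  have := heq i hmem
  rwa [List.getD_eq_getElem s 0 (by omega), List.getD_eq_getElem t 0 (by omega)] at this

-- ---- U is left-commutative on good elements ----

theorem U_lt_trans (z x y : List Int × Int)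
    (h1 : (decide (z.2 < x.2) || ((z.2 == x.2) && !z.1.isEmpty && beatsB x.1 z.1)) = true)
    (h2 : (decide (x.2 < y.2) || ((x.2 == y.2) && !x.1.isEmpty && beatsB y.1 x.1)) = true) :
    (decide (z.2 < y.2) || ((z.2 == y.2) && !z.1.isEmpty && beatsB y.1 z.1)) = true := by
  simp only [Bool.or_eq_true, decide_eq_true_eq, Bool.and_eq_true, beq_iff_eq] at h1 h2 ⊢
  rcases h1 with h1 | ⟨⟨h1e, h1n⟩, h1b⟩
  · rcases h2 with h2 | ⟨⟨h2e, _⟩, _⟩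
    · left; omega
    · left; omega
  · rcases h2 with h2 | ⟨⟨h2e, _⟩, h2b⟩
    · left; omega
    · right
      refine ⟨⟨by omega, h1n⟩, beatsAux_trans _ _ _ _ h2b h1b⟩

theorem U_comm (info : List Int) (z x y : List Int × Int) (hx : Good info x) (hy : Good info y) :
    U (U z x) y = U (U z y) x := by
  by_cases hzx : (decide (z.2 < x.2) || ((z.2 == x.2) && !z.1.isEmpty && beatsB x.1 z.1)) = true
  · have ezx : U z x = x := by rw [U, if_pos hzx]
    by_cases hzy : (decide (z.2 < y.2) || ((z.2 == y.2) && !z.1.isEmpty && beatsB y.1 z.1)) = true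
    · have ezy : U z y = y := by rw [U, if_pos hzy]
      rw [ezx, ezy]
      -- goal: U x y = U y x
      by_cases hxy : x = y
      · rw [hxy]
      · have hlen_x : x.1.length = 11 := hx.1
        have hlen_y : y.1.length = 11 := hy.1
        have hnex : x.1.isEmpty = false := by
          simp [List.isEmpty_iff]; intro hc; rw [hc] at hlen_x; simp at hlen_x
        have hney : y.1.isEmpty = false := by
          simp [List.isEmpty_iff]; intro hc; rw [hc] at hlen_y; simp at hlen_y
        by_cases hgap : x.2 = y.2
        · have hsne : x.1 ≠ y.1 := by
            intro hc
            apply hxy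
            obtain ⟨x1, x2⟩ := x; obtain ⟨y1, y2⟩ := y
            simp only at hc hgap
            rw [Prod.mk.injEq]
            exact ⟨hc, hgap⟩
          rcases beatsB_total x.1 y.1 hlen_x hlen_y hsne with hb | hb
          · -- x.1 beats y.1
            have hba : beatsB y.1 x.1 = false := beatsAux_asymm _ _ _ hb
            have e1 : U x y = x := by
              rw [U, if_neg (by
                simp only [Bool.or_eq_true, decide_eq_true_eq, Bool.and_eq_true, beq_iff_eq]
                rintro (hc | ⟨-, hc⟩)
                · omega
                · simp [hba] at hc)]
            have e2 : U y x = x := by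
              rw [U, if_pos (by
                simp only [Bool.or_eq_true, decide_eq_true_eq, Bool.and_eq_true, beq_iff_eq,
                  Bool.not_eq_true', hgap, hney, hb]
                simp)]
            rw [e1, e2]
          · have hba : beatsB x.1 y.1 = false := beatsAux_asymm _ _ _ hb
            have e1 : U x y = y := by
              rw [U, if_pos (by
                simp only [Bool.or_eq_true, decide_eq_true_eq, Bool.and_eq_true, beq_iff_eq,
                  Bool.not_eq_true', hgap, hnex, hb]
                simp)]
            have e2 : U y x = y := by
              rw [U, if_neg (by
                simp only [Bool.or_eq_true, decide_eq_true_eq, Bool.and_eq_true, beq_iff_eq]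
                rintro (hc | ⟨-, hc⟩)
                · omega
                · simp [hba] at hc)]
            rw [e1, e2]
        · rcases lt_or_gt_of_ne hgap with hlt | hlt
          · have e1 : U x y = y := by
              rw [U, if_pos (by simp only [Bool.or_eq_true, decide_eq_true_eq]; exact Or.inl hlt)]
            have e2 : U y x = y := by
              rw [U, if_neg (by
                simp only [Bool.or_eq_true, decide_eq_true_eq, Bool.and_eq_true, beq_iff_eq]
                rintro (hc | ⟨⟨hc, -⟩, -⟩) <;> omega)]
            rw [e1, e2]
          · have e1 : U x y = x := by
              rw [U, if_neg (by
                simp only [Bool.or_eq_true, decide_eq_true_eq, Bool.and_eq_true, beq_iff_eq]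
                rintro (hc | ⟨⟨hc, -⟩, -⟩) <;> omega)]
            have e2 : U y x = x := by
              rw [U, if_pos (by simp only [Bool.or_eq_true, decide_eq_true_eq]; exact Or.inl hlt)]
            rw [e1, e2]
    · have ezy : U z y = z := by rw [U, if_neg hzy]
      have hxy : ¬ (decide (x.2 < y.2) || ((x.2 == y.2) && !x.1.isEmpty && beatsB y.1 x.1)) = true := by
        intro hc
        exact hzy (U_lt_trans z x y hzx hc)
      have exy : U x y = x := by rw [U, if_neg hxy]
      simp only [ezx, ezy, exy]
  · have ezx : U z x = z := by rw [U, if_neg hzx]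
    by_cases hzy : (decide (z.2 < y.2) || ((z.2 == y.2) && !z.1.isEmpty && beatsB y.1 z.1)) = true
    · have ezy : U z y = y := by rw [U, if_pos hzy]
      have hyx : ¬ (decide (y.2 < x.2) || ((y.2 == x.2) && !y.1.isEmpty && beatsB x.1 y.1)) = true := by
        intro hc
        exact hzx (U_lt_trans z y x hzy hc)
      have eyx : U y x = y := by rw [U, if_neg hyx]
      simp only [ezx, ezy, eyx]
    · have ezy : U z y = z := by rw [U, if_neg hzy]
      simp only [ezx, ezy]

-- ---- folds of U over permuted blocks ----

theorem foldl_push {α : Type} (f : α → α → α) (x : α) (l : List α) (z : α)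
    (h : ∀ y ∈ l, ∀ w, f (f w x) y = f (f w y) x) :
    l.foldl f (f z x) = f (l.foldl f z) x := by
  induction l generalizing z with
  | nil => rfl
  | cons y r ih =>
      simp only [List.foldl_cons]
      rw [h y List.mem_cons_self z]
      exact ih _ (fun y' hy' w => h y' (List.mem_cons_of_mem _ hy') w)

theorem foldl_swap_blocks {α : Type} (f : α → α → α) (X Y : List α) (z : α)
    (h : ∀ x ∈ X ++ Y, ∀ y ∈ X ++ Y, ∀ w, f (f w x) y = f (f w y) x) :
    (X ++ Y).foldl f z = (Y ++ X).foldl f z := by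
  induction X generalizing z with
  | nil => simp
  | cons x X' ih =>
      have hx : x ∈ (x :: X') ++ Y := by simp
      have hsub : ∀ a ∈ X' ++ Y, ∀ b ∈ X' ++ Y, ∀ w, f (f w a) b = f (f w b) a := by
        intro a ha b hb w
        exact h a (by simp at ha ⊢; tauto) b (by simp at hb ⊢; tauto) w
      simp only [List.cons_append, List.foldl_cons]
      rw [ih _ hsub]
      -- goal: (Y ++ X').foldl f (f z x) = (Y ++ x :: X').foldl f z
      rw [List.foldl_append, List.foldl_append]
      simp only [List.foldl_cons]
      congr 1
      apply foldl_push
      intro y hy w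
      exact h x hx y (by simp at hy ⊢; tauto) w

-- ---- the leaves are good ----

theorem leafList_good (info : List Int) (order : Nat) (arrows : Int) (score : List Int)
    (hs : score.length = 11) :
    ∀ x ∈ leafList info order arrows score, Good info x := by
  fun_induction leafList info order arrows score with
  | case1 =>
      rename_i order arrows score hleaf
      intro x hx
      simp only [List.mem_singleton] at hx
      subst hx
      exact ⟨by simp [leafFin, hs], rfl⟩
  | case2 =>
      rename_i order arrows score hleaf ih2 ih1
      intro x hx
      rcases List.mem_append.1 hx with hx | hx
      · exact ih2 hs x hx
      · split at hx
        · exact ih1 (by simp [hs]) x hx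
        · simp at hx

-- ---- A's helpers compute U of the finalised leaf ----

theorem set_getD_self (l : List Int) (n : Nat) (hn : n < l.length) :
    l.set n (l.getD n 0) = l := by
  rw [List.getD_eq_getElem l 0 hn, List.set_getElem_self]

theorem gapA_eq_gapB (info score : List Int) (hs : score.length = 11) :
    gapA info score = gapB info score := by
  rw [gapA, gapB]
  have key : (PySem.List.enumerate score).foldl
      (fun g p =>
        if info.getD p.1.toNat 0 == 0 && score.getD p.1.toNat 0 == 0 then g
        else if info.getD p.1.toNat 0 ≥ score.getD p.1.toNat 0 then g - (10 - p.1) else g + (10 - p.1)) 0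
      = ((PySem.List.enumerate score).map (fun p => p.1)).foldl
      (fun g i =>
        if info.getD i.toNat 0 == 0 && score.getD i.toNat 0 == 0 then g
        else if info.getD i.toNat 0 ≥ score.getD i.toNat 0 then g - (10 - i) else g + (10 - i)) 0 := by
    rw [List.foldl_map]
  rw [key, PySem.List.map_fst_enumerate]
  have : (0 : Int) + (score.length : Int) = 11 := by rw [hs]; norm_num
  rw [this, PySem.List.pyRange_zero]
  norm_num
  rw [List.foldl_map]
  apply PySem.List.foldl_congr_mem
  intro acc k hk
  norm_num [Int.toNat_natCast]
  split_ifs <;> omega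

theorem tieAux_eq_beats (idxs : List Nat) (ans : List Int × Int) (s : List Int) (g : Int) :
    tieAux idxs ans s g = if beatsAux idxs s ans.1 then (s, g) else ans := by
  induction idxs with
  | nil => simp [tieAux, beatsAux]
  | cons i r ih =>
      simp only [tieAux, beatsAux, beq_iff_eq, bne_iff_ne, ne_eq, ite_not, gt_iff_lt]
      by_cases he : ans.1.getD i 0 = s.getD i 0
      · rw [if_pos he, if_pos he.symm, ih]
      · rw [if_neg he, if_neg (Ne.symm he)]
        by_cases hgt : s.getD i 0 < ans.1.getD i 0
        · have h2 : ¬ ans.1.getD i 0 < s.getD i 0 := by omega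
          rw [if_pos hgt, if_neg (by simpa using h2)]
        · have h2 : ans.1.getD i 0 < s.getD i 0 := by omega
          rw [if_neg hgt, if_pos (by simpa using h2)]

theorem leafUpdate_eq_U (info : List Int) (ans : List Int × Int) (score : List Int) (arrows : Int)
    (hs : score.length = 11) :
    leafUpdate info ans score arrows = U ans (leafFin score arrows, gapB info (leafFin score arrows)) := by
  have hfin : (if arrows != 0 then
      score.set (score.length - 1) (score.getD (score.length - 1) 0 + arrows)
    else score) = leafFin score arrows := by
    rw [hs]
    by_cases ha : arrows = 0
    · have hset := set_getD_self score 10 (by omega)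
      simp only [List.getD_eq_getElem?_getD] at hset
      simp [ha, leafFin, hset]
    · simp [ha, leafFin]
  have hlen : (leafFin score arrows).length = 11 := by simp [leafFin, hs]
  rw [leafUpdate, hfin, gapA_eq_gapB info _ hlen, U]
  simp only [tieAux_eq_beats, beatsB]
  by_cases h1 : ans.2 < gapB info (leafFin score arrows)
  · simp [h1]
  · by_cases h2 : ans.2 = gapB info (leafFin score arrows)
    · by_cases h3 : ans.1.isEmpty
      · simp [h1, h2, h3]
      · by_cases h4 : beatsAux ((List.range 11).reverse) (leafFin score arrows) ans.1
        · simp [h1, h2, h3, h4]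
        · simp [h1, h2, h3, h4]
    · simp [h1, h2]

-- ---- A's loop folds U over the leaves ----

theorem flatLeaf_cons (info : List Int) (sc : List Int) (o : Nat) (a : Int)
    (rest : List (List Int × Nat × Int)) :
    List.flatMap (fun e : List Int × Nat × Int => leafList info e.2.1 e.2.2 e.1) ((sc, o, a) :: rest)
      = leafList info o a sc ++
        List.flatMap (fun e => leafList info e.2.1 e.2.2 e.1) rest := by
  simp [List.flatMap_cons]

theorem loopA_eq_foldl (info : List Int) (q : List (List Int × Nat × Int))
    (h : ∀ e ∈ q, e.2.1 ≤ 11) (hlen : ∀ e ∈ q, e.1.length = 11) (ans : List Int × Int) :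
    loopA info q ans h = (q.flatMap (fun e => leafList info e.2.1 e.2.2 e.1)).foldl U ans := by
  fun_induction loopA info q ans h with
  | case1 => simp
  | case2 =>
      rename_i ans score order arrows rest hq hleaf hq2 ih
      have hslen : score.length = 11 := hlen _ List.mem_cons_self
      have hrest : ∀ e ∈ rest, e.1.length = 11 := fun e he => hlen e (List.mem_cons_of_mem _ he)
      have hcond : (decide (11 ≤ order) || arrows == 0) = true := by
        simp only [Bool.or_eq_true, beq_iff_eq, decide_eq_true_eq] at hleaf ⊢
        rcases hleaf with hcase | hcase
        · left; omega
        · right; exact hcase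
      rw [ih hrest, flatLeaf_cons, leafList, dif_pos hcond]
      simp only [List.cons_append, List.nil_append, List.foldl_cons]
      rw [leafUpdate_eq_U info ans score arrows hslen]
  | case3 =>
      rename_i ans score order arrows rest hq hleaf hq2 ih
      have hslen : score.length = 11 := hlen _ List.mem_cons_self
      have hrest : ∀ e ∈ rest, e.1.length = 11 := fun e he => hlen e (List.mem_cons_of_mem _ he)
      have horder : order ≤ 11 := hq _ List.mem_cons_self
      have hnleaf : ¬ (order = 11 ∨ arrows = 0) := by
        simp only [Bool.or_eq_true, beq_iff_eq, decide_eq_true_eq] at hleaf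
        exact hleaf
      have hcond : ¬ (decide (11 ≤ order) || arrows == 0) = true := by
        simp only [Bool.or_eq_true, beq_iff_eq, decide_eq_true_eq]
        rintro (hcase | hcase) <;> exact hnleaf (by omega)
      refine (ih ?_).trans ?_
      · intro e he
        rcases List.mem_append.1 he with h1 | h1
        · exact hrest e h1
        · rcases List.mem_cons.1 h1 with rfl | h1
          · exact hslen
          · split at h1
            · simp only [List.mem_singleton] at h1
              subst h1
              simp [hslen]
            · simp at h1
      · conv_rhs => rw [flatLeaf_cons, leafList, dif_neg hcond]
        rw [List.flatMap_append, flatLeaf_cons]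
        have hgood1 := leafList_good info (order + 1) arrows score hslen
        have hmem : ∀ L : List (List Int × Int), (∀ x ∈ L, Good info x) →
            ∀ x ∈ List.flatMap (fun e => leafList info e.2.1 e.2.2 e.1) rest ++ L,
              Good info x := by
          intro L hL x hx
          rcases List.mem_append.1 hx with h1 | h1
          · rcases List.mem_flatMap.1 h1 with ⟨e, he, hxe⟩
            exact leafList_good info _ _ _ (hrest e he) x hxe
          · exact hL x h1
        by_cases hc : arrows ≥ info.getD order 0 + 1
        · rw [dif_pos hc, if_pos hc, flatLeaf_cons]
          have hgood2 := leafList_good info (order + 1) (arrows - (info.getD order 0 + 1))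
            (score.set order (info.getD order 0 + 1)) (by simp [hslen])
          simp only [List.flatMap_nil, List.append_nil]
          apply foldl_swap_blocks
          intro x hx y hy w
          have hg : ∀ v ∈ leafList info (order + 1) arrows score ++
              leafList info (order + 1) (arrows - (info.getD order 0 + 1))
                (score.set order (info.getD order 0 + 1)), Good info v := by
            intro v hv
            rcases List.mem_append.1 hv with h1 | h1
            · exact hgood1 v h1
            · exact hgood2 v h1
          exact U_comm info w x y (hmem _ hg x hx) (hmem _ hg y hy)
        · rw [dif_neg hc, if_neg hc, List.flatMap_nil]
          simp only [List.append_nil]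
          apply foldl_swap_blocks
          intro x hx y hy w
          exact U_comm info w x y (hmem _ hgood1 x hx) (hmem _ hgood1 y hy)

-- ---- B's DFS folds U over the same leaves, through the simulation RR ----

def RR (ans : List Int × Int) (ob : Option (Int × List Int)) : Prop :=
  (ans = ([], 0) ∧ ob = none) ∨ (0 < ans.2 ∧ ans.1.length = 11 ∧ ob = some (ans.2, ans.1))

def takeCond (g : Int) (s : List Int) (best : Option (Int × List Int)) : Bool :=
  decide (0 < g) &&
    (match best with
     | none => true
     | some (bg, bs) => decide (bg < g) || (g == bg && beatsB s bs))

theorem takeCond_none (g : Int) (s : List Int) : takeCond g s none = true ↔ 0 < g := by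
  simp [takeCond]

theorem takeCond_some (g : Int) (s : List Int) (bg : Int) (t : List Int) :
    takeCond g s (some (bg, t)) = true ↔
      (0 < g ∧ (bg < g ∨ (g = bg ∧ beatsB s t = true))) := by
  simp [takeCond, and_congr_right_iff]

theorem RR_step (info : List Int) (ans : List Int × Int) (best : Option (Int × List Int))
    (s : List Int) (hr : RR ans best) (hslen : s.length = 11) :
    RR (U ans (s, gapB info s))
       (if takeCond (gapB info s) s best then some (gapB info s, s) else best) := by
  rcases hr with ⟨hans, hbest⟩ | ⟨hpos, hlen, hbest⟩
  · subst hbest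
    by_cases hg : (0 : Int) < gapB info s
    · rw [if_pos ((takeCond_none _ _).2 hg), hans, U,
        if_pos (by simp only [Bool.or_eq_true, decide_eq_true_eq]; exact Or.inl hg)]
      right
      exact ⟨hg, hslen, rfl⟩
    · rw [if_neg (fun hc => hg ((takeCond_none _ _).1 hc)), hans, U, if_neg (by simp; omega)]
      left
      exact ⟨rfl, rfl⟩
  · subst hbest
    have hne : ans.1.isEmpty = false := by
      rw [List.isEmpty_eq_false_iff, ← List.length_pos_iff]
      omega
    by_cases hcond : (decide (ans.2 < (s, gapB info s).2) ||
        ((ans.2 == (s, gapB info s).2) && !ans.1.isEmpty && beatsB (s, gapB info s).1 ans.1)) = true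
    · have hg : (0 : Int) < gapB info s := by
        simp only [Bool.or_eq_true, decide_eq_true_eq, Bool.and_eq_true, beq_iff_eq] at hcond
        rcases hcond with hcase | ⟨⟨hc1, -⟩, -⟩ <;> omega
      rw [U, if_pos hcond, if_pos ((takeCond_some _ _ _ _).2 ⟨hg, by
          simp only [Bool.or_eq_true, decide_eq_true_eq, Bool.and_eq_true, beq_iff_eq] at hcond
          rcases hcond with hcase | ⟨⟨h1, -⟩, h3⟩
          · exact Or.inl hcase
          · exact Or.inr ⟨h1.symm, h3⟩⟩)]
      right
      exact ⟨hg, hslen, rfl⟩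
    · rw [U, if_neg hcond, if_neg (by
        rw [takeCond_some]
        rintro ⟨hg, hcase | ⟨hc1, hc2⟩⟩
        · exact hcond (by
            simp only [Bool.or_eq_true, decide_eq_true_eq]
            exact Or.inl hcase)
        · exact hcond (by
            simp only [Bool.or_eq_true, Bool.and_eq_true, beq_iff_eq, decide_eq_true_eq]
            exact Or.inr ⟨⟨hc1.symm, by rw [hne]; rfl⟩, hc2⟩))]
      right
      exact ⟨hpos, hlen, rfl⟩

theorem dfsB_leaf (info : List Int) (i : Nat) (arrows : Int) (p : List Int)
    (best : Option (Int × List Int)) (ans : List Int × Int)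
    (hleaf : (decide (11 ≤ i) || arrows == 0) = true)
    (hp : p.length = i) (hi : i ≤ 11) (hr : RR ans best) :
    RR ((leafList info i arrows (p ++ List.replicate (11 - i) 0)).foldl U ans)
       (dfsB info i arrows p best) := by
  have hbody : dfsB info i arrows p best =
      (if takeCond (gapB info (leafFin (p ++ List.replicate (11 - i) 0) arrows))
            (leafFin (p ++ List.replicate (11 - i) 0) arrows) best
        then some (gapB info (leafFin (p ++ List.replicate (11 - i) 0) arrows),
          leafFin (p ++ List.replicate (11 - i) 0) arrows)
        else best) := by
    conv_lhs => rw [dfsB.eq_def]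
    rw [dif_pos hleaf]
    rfl
  rw [hbody, leafList, dif_pos hleaf]
  simp only [List.foldl_cons, List.foldl_nil]
  exact RR_step info ans best _ hr
    (by simp only [leafFin, List.length_set, List.length_append, List.length_replicate, hp]; omega)

theorem dfsB_eq_foldl (info : List Int) (k : Nat) : ∀ (i : Nat) (arrows : Int) (p : List Int)
    (best : Option (Int × List Int)) (ans : List Int × Int),
    11 - i = k → p.length = i → i ≤ 11 → RR ans best →
    RR ((leafList info i arrows (p ++ List.replicate (11 - i) 0)).foldl U ans)
       (dfsB info i arrows p best) := by
  induction k with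
  | zero =>
      intro i arrows p best ans hk hp hi hr
      have hi11 : i = 11 := by omega
      exact dfsB_leaf info i arrows p best ans (by simp [hi11]) hp hi hr
  | succ k ih =>
      intro i arrows p best ans hk hp hi hr
      by_cases hleaf : (decide (11 ≤ i) || arrows == 0) = true
      · exact dfsB_leaf info i arrows p best ans hleaf hp hi hr
      · have hi' : i < 11 := by
          simp only [Bool.or_eq_true, decide_eq_true_eq, beq_iff_eq] at hleaf
          push_neg at hleaf
          omega
        have hbody : dfsB info i arrows p best =
            (if arrows ≥ info.getD i 0 + 1 then
              dfsB info (i + 1) (arrows - (info.getD i 0 + 1)) (p ++ [info.getD i 0 + 1])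
                (dfsB info (i + 1) arrows (p ++ [0]) best)
            else dfsB info (i + 1) arrows (p ++ [0]) best) := by
          conv_lhs => rw [dfsB.eq_def]
          rw [dif_neg hleaf]
        have hX : p ++ List.replicate (11 - i) 0 = (p ++ [0]) ++ List.replicate (11 - (i + 1)) 0 := by
          have h1 : 11 - i = (11 - (i + 1)) + 1 := by omega
          rw [h1, List.replicate_succ, List.append_assoc]
          rfl
        have ih1 := ih (i + 1) arrows (p ++ [0]) best ans (by omega) (by simp [hp]) (by omega) hr
        rw [← hX] at ih1
        rw [hbody, leafList, dif_neg hleaf]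
        by_cases hc : arrows ≥ info.getD i 0 + 1
        · rw [if_pos hc, if_pos hc, List.foldl_append]
          have hset : (p ++ List.replicate (11 - i) 0).set i (info.getD i 0 + 1) =
              (p ++ [info.getD i 0 + 1]) ++ List.replicate (11 - (i + 1)) 0 := by
            have h1 : 11 - i = (11 - (i + 1)) + 1 := by omega
            rw [h1, List.replicate_succ, ← hp, List.set_append_right _ _ (le_refl _)]
            simp
          rw [hset]
          exact ih (i + 1) (arrows - (info.getD i 0 + 1)) (p ++ [info.getD i 0 + 1])
            (dfsB info (i + 1) arrows (p ++ [0]) best)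
            ((leafList info (i + 1) arrows (p ++ List.replicate (11 - i) 0)).foldl U ans)
            (by omega) (by simp [hp]) (by omega) ih1
        · rw [if_neg hc, if_neg hc, List.append_nil]
          exact ih1

-- ===== VERDICT (by name: the statement is the Claim_ definition above) =====
theorem solution_spec : Claim_equal_solution := by
  intro n info hdom hpre
  unfold Spec_solution solution solution_alt
  have hB := dfsB_eq_foldl info 11 0 n [] none ([], 0) (by omega) rfl (by omega)
    (Or.inl ⟨rfl, rfl⟩)
  simp only [List.nil_append, Nat.sub_zero] at hB
  rw [loopA_eq_foldl info [(List.replicate 11 0, 0, n)] (initInv n)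
    (by intro e he; simp only [List.mem_singleton] at he; simp [he]) ([], 0)]
  rw [flatLeaf_cons, List.flatMap_nil, List.append_nil]
  rcases hB with ⟨h1, h2⟩ | ⟨hpos, hlen2, h2⟩
  · rw [h2, h1]
    simp
  · rw [h2]
    simp only [bne_iff_ne, ne_eq]
    rw [if_pos (by omega)]
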